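-- pv_equiv track=rewrite | github.com/alex-tifox/way_of_signal_transmission | src/dtmf_generator.py | dtmf_encode_string_to_signal
-- ===== SOURCE A (Python) =====
-- def dtmf_encode_string_to_signal(string_to_encode):
--     string_to_encode = str.lower(string_to_encode)
--     result_string_for_dtmf_generation = ''
--     for char in string_to_encode:
--         if char == 'a':
--             result_string_for_dtmf_generation += '2'
--         elif char == 'b':
--             result_string_for_dtmf_generation += '22'
--         elif char == 'c':
--             result_string_for_dtmf_generation += '222'
--         elif char == 'd':
--             result_string_for_dtmf_generation += '3'
--         elif char == 'e':
--             result_string_for_dtmf_generation += '33'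
--         elif char == 'f':
--             result_string_for_dtmf_generation += '333'
--         elif char == 'g':
--             result_string_for_dtmf_generation += '4'
--         elif char == 'h':
--             result_string_for_dtmf_generation += '44'
--         elif char == 'i':
--             result_string_for_dtmf_generation += '444'
--         elif char == 'j':
--             result_string_for_dtmf_generation += '5'
--         elif char == 'k':
--             result_string_for_dtmf_generation += '55'
--         elif char == 'l':
--             result_string_for_dtmf_generation += '555'
--         elif char == 'm':
--             result_string_for_dtmf_generation += '6'
--         elif char == 'n':
--             result_string_for_dtmf_generation += '66'
--         elif char == 'o':
--             result_string_for_dtmf_generation += '666'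
--         elif char == 'p':
--             result_string_for_dtmf_generation += '7'
--         elif char == 'q':
--             result_string_for_dtmf_generation += '77'
--         elif char == 'r':
--             result_string_for_dtmf_generation += '777'
--         elif char == 's':
--             result_string_for_dtmf_generation += '7777'
--         elif char == 't':
--             result_string_for_dtmf_generation += '8'
--         elif char == 'u':
--             result_string_for_dtmf_generation += '88'
--         elif char == 'v':
--             result_string_for_dtmf_generation += '888'
--         elif char == 'w':
--             result_string_for_dtmf_generation += '9'
--         elif char == 'x':
--             result_string_for_dtmf_generation += '99'
--         elif char == 'y':
--             result_string_for_dtmf_generation += '999'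
--         elif char == 'z':
--             result_string_for_dtmf_generation += '9999'
--         elif char == ' ' or char == '_':
--             result_string_for_dtmf_generation += '0'
--
--     return result_string_for_dtmf_generation
-- ===== SOURCE B (Python) =====
-- GROUPS = ['abc', 'def', 'ghi', 'jkl', 'mno', 'pqrs', 'tuv', 'wxyz']
--
--
-- def _piece(ch):
--     """Digit string for a letter: str(group_index+2) repeated (position+1) times."""
--     for gi, g in enumerate(GROUPS):
--         p = 0
--         for letter in g:
--             if letter == ch:
--                 return str(gi + 2) * (p + 1)
--             p += 1
--     return None
--
--
-- def dtmf_encode_string_to_signal(string_to_encode):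
--     pieces = []
--     for ch in str.lower(string_to_encode):
--         if ch == ' ' or ch == '_':
--             pieces.append('0')
--         else:
--             piece = _piece(ch)
--             if piece is not None:
--                 pieces.append(piece)
--     return ''.join(pieces)
-- ===== Notes on version B (the rewrite author's own statement) =====
-- stated objective: idiomatic
-- what changed: Replaces the 28-branch elif chain by a keypad table of letter groups: each digit string is derived as str(group_index+2) repeated (position+1) times, and the output is joined from a list of pieces instead of repeated string concatenation.
import Mathlib
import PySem

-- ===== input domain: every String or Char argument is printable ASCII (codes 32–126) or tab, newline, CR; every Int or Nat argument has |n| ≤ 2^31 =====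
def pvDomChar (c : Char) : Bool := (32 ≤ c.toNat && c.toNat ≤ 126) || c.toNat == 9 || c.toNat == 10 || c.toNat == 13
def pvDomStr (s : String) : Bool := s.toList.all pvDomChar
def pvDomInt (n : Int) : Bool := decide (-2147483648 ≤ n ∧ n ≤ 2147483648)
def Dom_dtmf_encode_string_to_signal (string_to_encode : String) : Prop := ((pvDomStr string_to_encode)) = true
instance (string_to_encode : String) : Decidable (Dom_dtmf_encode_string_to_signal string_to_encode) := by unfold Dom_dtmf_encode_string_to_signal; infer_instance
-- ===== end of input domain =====

set_option maxHeartbeats 2000000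

-- B replaces A's 28-branch elif chain by a keypad table of letter groups, deriving each
-- digit string from the group index and the letter's position, and joining the pieces (idiomatic).

-- ===== PORT A =====
def dtmf_encode_string_to_signal (string_to_encode : String) : String :=
  (PySem.Str.lower string_to_encode).toList.foldl (fun acc char =>
    if char = 'a' then acc ++ "2"
    else if char = 'b' then acc ++ "22"
    else if char = 'c' then acc ++ "222"
    else if char = 'd' then acc ++ "3"
    else if char = 'e' then acc ++ "33"
    else if char = 'f' then acc ++ "333"
    else if char = 'g' then acc ++ "4"
    else if char = 'h' then acc ++ "44"
    else if char = 'i' then acc ++ "444"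
    else if char = 'j' then acc ++ "5"
    else if char = 'k' then acc ++ "55"
    else if char = 'l' then acc ++ "555"
    else if char = 'm' then acc ++ "6"
    else if char = 'n' then acc ++ "66"
    else if char = 'o' then acc ++ "666"
    else if char = 'p' then acc ++ "7"
    else if char = 'q' then acc ++ "77"
    else if char = 'r' then acc ++ "777"
    else if char = 's' then acc ++ "7777"
    else if char = 't' then acc ++ "8"
    else if char = 'u' then acc ++ "88"
    else if char = 'v' then acc ++ "888"
    else if char = 'w' then acc ++ "9"
    else if char = 'x' then acc ++ "99"
    else if char = 'y' then acc ++ "999"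
    else if char = 'z' then acc ++ "9999"
    else if char = ' ' ∨ char = '_' then acc ++ "0"
    else acc) ""

-- ===== PORT B =====
def pvGroups : List String := ["abc", "def", "ghi", "jkl", "mno", "pqrs", "tuv", "wxyz"]

-- Python's `s * n` for n ≥ 0 (here n = p+1 ≥ 1): exact, simple repetition.
def pvStrRepeat (s : String) : Nat → String
  | 0 => ""
  | n + 1 => s ++ pvStrRepeat s n

-- inner loop of _piece: scan the letters of one group, tracking the position p
def pvPieceIn (ch : Char) (gi : Int) : List Char → Nat → Option String
  | [], _ => none
  | letter :: rest, p =>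
      if letter = ch then some (pvStrRepeat (PySem.Int.toStr (gi + 2)) (p + 1))
      else pvPieceIn ch gi rest (p + 1)

-- outer loop of _piece over enumerate(GROUPS)
def pvPieceGroups (ch : Char) : List (Int × String) → Option String
  | [] => none
  | (gi, g) :: rest =>
      match pvPieceIn ch gi g.toList 0 with
      | some s => some s
      | none => pvPieceGroups ch rest

def pvPiece (ch : Char) : Option String := pvPieceGroups ch (PySem.List.enumerate pvGroups)

def dtmf_encode_string_to_signal_alt (string_to_encode : String) : String :=
  PySem.Str.join "" ((PySem.Str.lower string_to_encode).toList.foldl (fun ps ch =>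
    if ch = ' ' ∨ ch = '_' then ps ++ ["0"]
    else
      match pvPiece ch with
      | some piece => ps ++ [piece]
      | none => ps) [])

-- ===== PRECONDITION & SPEC =====
def Spec_dtmf_encode_string_to_signal (string_to_encode : String) (out : String) : Prop := out = dtmf_encode_string_to_signal_alt string_to_encode
instance (string_to_encode : String) (out : String) : Decidable (Spec_dtmf_encode_string_to_signal string_to_encode out) := by unfold Spec_dtmf_encode_string_to_signal; infer_instance

-- ===== CLAIM (what is proved, stated in full; the proofs are below) =====
def Claim_equal_dtmf_encode_string_to_signal : Prop := ∀ (string_to_encode : String), Dom_dtmf_encode_string_to_signal string_to_encode → Spec_dtmf_encode_string_to_signal string_to_encode (dtmf_encode_string_to_signal string_to_encode)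

-- ===== LEMMAS AND PROOFS =====

-- the per-character piece of A, read off A's branch chain
def pieceA (c : Char) : String :=
  if c = 'a' then "2" else if c = 'b' then "22" else if c = 'c' then "222" else if c = 'd' then "3" else if c = 'e' then "33" else if c = 'f' then "333" else if c = 'g' then "4" else if c = 'h' then "44" else if c = 'i' then "444" else if c = 'j' then "5" else if c = 'k' then "55" else if c = 'l' then "555" else if c = 'm' then "6" else if c = 'n' then "66" else if c = 'o' then "666" else if c = 'p' then "7" else if c = 'q' then "77" else if c = 'r' then "777" else if c = 's' then "7777" else if c = 't' then "8" else if c = 'u' then "88" else if c = 'v' then "888" else if c = 'w' then "9" else if c = 'x' then "99" else if c = 'y' then "999" else if c = 'z' then "9999" else if c = ' ' ∨ c = '_' then "0" else ""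

-- B's per-character contribution to the pieces list
def pbl (c : Char) : List String :=
  if c = ' ' ∨ c = '_' then ["0"]
  else match pvPiece c with
       | some piece => [piece]
       | none => []

lemma foldA_eq (l : List Char) : ∀ acc : String,
    (l.foldl (fun acc char =>
      if char = 'a' then acc ++ "2"
    else if char = 'b' then acc ++ "22"
    else if char = 'c' then acc ++ "222"
    else if char = 'd' then acc ++ "3"
    else if char = 'e' then acc ++ "33"
    else if char = 'f' then acc ++ "333"
    else if char = 'g' then acc ++ "4"
    else if char = 'h' then acc ++ "44"
    else if char = 'i' then acc ++ "444"
    else if char = 'j' then acc ++ "5"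
    else if char = 'k' then acc ++ "55"
    else if char = 'l' then acc ++ "555"
    else if char = 'm' then acc ++ "6"
    else if char = 'n' then acc ++ "66"
    else if char = 'o' then acc ++ "666"
    else if char = 'p' then acc ++ "7"
    else if char = 'q' then acc ++ "77"
    else if char = 'r' then acc ++ "777"
    else if char = 's' then acc ++ "7777"
    else if char = 't' then acc ++ "8"
    else if char = 'u' then acc ++ "88"
    else if char = 'v' then acc ++ "888"
    else if char = 'w' then acc ++ "9"
    else if char = 'x' then acc ++ "99"
    else if char = 'y' then acc ++ "999"
    else if char = 'z' then acc ++ "9999"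
    else if char = ' ' ∨ char = '_' then acc ++ "0"
    else acc) acc).toList
    = acc.toList ++ l.flatMap (fun c => (pieceA c).toList) := by
  induction l with
  | nil => intro acc; simp
  | cons c l ih =>
      intro acc
      simp only [List.foldl_cons, List.flatMap_cons, ih]
      have hstep : ∀ acc : String, (if c = 'a' then acc ++ "2"
        else if c = 'b' then acc ++ "22"
        else if c = 'c' then acc ++ "222"
        else if c = 'd' then acc ++ "3"
        else if c = 'e' then acc ++ "33"
        else if c = 'f' then acc ++ "333"
        else if c = 'g' then acc ++ "4"
        else if c = 'h' then acc ++ "44"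
        else if c = 'i' then acc ++ "444"
        else if c = 'j' then acc ++ "5"
        else if c = 'k' then acc ++ "55"
        else if c = 'l' then acc ++ "555"
        else if c = 'm' then acc ++ "6"
        else if c = 'n' then acc ++ "66"
        else if c = 'o' then acc ++ "666"
        else if c = 'p' then acc ++ "7"
        else if c = 'q' then acc ++ "77"
        else if c = 'r' then acc ++ "777"
        else if c = 's' then acc ++ "7777"
        else if c = 't' then acc ++ "8"
        else if c = 'u' then acc ++ "88"
        else if c = 'v' then acc ++ "888"
        else if c = 'w' then acc ++ "9"
        else if c = 'x' then acc ++ "99"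
        else if c = 'y' then acc ++ "999"
        else if c = 'z' then acc ++ "9999"
        else if c = ' ' ∨ c = '_' then acc ++ "0"
        else acc) = acc ++ pieceA c := by
        intro acc
        unfold pieceA
        by_cases h0 : c = 'a'
        · subst h0; rfl
        simp only [if_neg h0]
        by_cases h1 : c = 'b'
        · subst h1; rfl
        simp only [if_neg h1]
        by_cases h2 : c = 'c'
        · subst h2; rfl
        simp only [if_neg h2]
        by_cases h3 : c = 'd'
        · subst h3; rfl
        simp only [if_neg h3]
        by_cases h4 : c = 'e'
        · subst h4; rfl
        simp only [if_neg h4]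
        by_cases h5 : c = 'f'
        · subst h5; rfl
        simp only [if_neg h5]
        by_cases h6 : c = 'g'
        · subst h6; rfl
        simp only [if_neg h6]
        by_cases h7 : c = 'h'
        · subst h7; rfl
        simp only [if_neg h7]
        by_cases h8 : c = 'i'
        · subst h8; rfl
        simp only [if_neg h8]
        by_cases h9 : c = 'j'
        · subst h9; rfl
        simp only [if_neg h9]
        by_cases h10 : c = 'k'
        · subst h10; rfl
        simp only [if_neg h10]
        by_cases h11 : c = 'l'
        · subst h11; rfl
        simp only [if_neg h11]
        by_cases h12 : c = 'm'
        · subst h12; rfl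
        simp only [if_neg h12]
        by_cases h13 : c = 'n'
        · subst h13; rfl
        simp only [if_neg h13]
        by_cases h14 : c = 'o'
        · subst h14; rfl
        simp only [if_neg h14]
        by_cases h15 : c = 'p'
        · subst h15; rfl
        simp only [if_neg h15]
        by_cases h16 : c = 'q'
        · subst h16; rfl
        simp only [if_neg h16]
        by_cases h17 : c = 'r'
        · subst h17; rfl
        simp only [if_neg h17]
        by_cases h18 : c = 's'
        · subst h18; rfl
        simp only [if_neg h18]
        by_cases h19 : c = 't'
        · subst h19; rfl
        simp only [if_neg h19]
        by_cases h20 : c = 'u'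
        · subst h20; rfl
        simp only [if_neg h20]
        by_cases h21 : c = 'v'
        · subst h21; rfl
        simp only [if_neg h21]
        by_cases h22 : c = 'w'
        · subst h22; rfl
        simp only [if_neg h22]
        by_cases h23 : c = 'x'
        · subst h23; rfl
        simp only [if_neg h23]
        by_cases h24 : c = 'y'
        · subst h24; rfl
        simp only [if_neg h24]
        by_cases h25 : c = 'z'
        · subst h25; rfl
        simp only [if_neg h25]
        by_cases hsp : c = ' ' ∨ c = '_'
        · rcases hsp with h | h <;> subst h <;> rfl
        simp only [if_neg hsp]
        exact String.append_empty.symm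
      rw [hstep]
      simp [List.append_assoc]

lemma foldB_eq (l : List Char) : ∀ ps : List String,
    (l.foldl (fun ps ch =>
      if ch = ' ' ∨ ch = '_' then ps ++ ["0"]
      else
        match pvPiece ch with
        | some piece => ps ++ [piece]
        | none => ps) ps) = ps ++ l.flatMap pbl := by
  induction l with
  | nil => intro ps; simp
  | cons c l ih =>
      intro ps
      simp only [List.foldl_cons, List.flatMap_cons, ih]
      unfold pbl
      split_ifs with h
      · simp
      · cases pvPiece c <;> simp

-- ''.join concatenates
lemma join_empty_sep (parts : List (List Char)) :
    PySem.Chars.join [] parts = parts.flatten := by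
  induction parts with
  | nil => simp [PySem.Chars.join_nil]
  | cons a rest ih =>
      cases rest with
      | nil => simp [PySem.Chars.join_singleton]
      | cons b r => rw [PySem.Chars.join_cons_cons]; simp [ih]

lemma flatten_flatMap {α β γ : Type} (l : List α) (g : α → List β) (f : β → List γ) :
    ((l.flatMap g).map f).flatten = l.flatMap (fun c => ((g c).map f).flatten) := by
  induction l with
  | nil => simp
  | cons c l ih => simp [List.flatMap_cons, ih]

-- B's group scan, written out as the chain of letters it tests
lemma pvPiece_eq (c : Char) : pvPiece c = (if c = 'a' then some "2" else if c = 'b' then some "22" else if c = 'c' then some "222" else if c = 'd' then some "3" else if c = 'e' then some "33" else if c = 'f' then some "333" else if c = 'g' then some "4" else if c = 'h' then some "44" else if c = 'i' then some "444" else if c = 'j' then some "5" else if c = 'k' then some "55" else if c = 'l' then some "555" else if c = 'm' then some "6" else if c = 'n' then some "66" else if c = 'o' then some "666" else if c = 'p' then some "7" else if c = 'q' then some "77" else if c = 'r' then some "777" else if c = 's' then some "7777" else if c = 't' then some "8" else if c = 'u' then some "88" else if c = 'v' then some "888" else if c = 'w' then some "9" else if c = 'x' then some "99" else if c = 'y'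 then some "999" else if c = 'z' then some "9999" else none) := by
  have he : PySem.List.enumerate pvGroups =
      [((0 : Int), "abc"), (1, "def"), (2, "ghi"), (3, "jkl"),
       (4, "mno"), (5, "pqrs"), (6, "tuv"), (7, "wxyz")] := by decide
  rw [pvPiece, he]
  simp only [pvPieceGroups, pvPieceIn,
    show "abc".toList = ['a','b','c'] from rfl,
    show "def".toList = ['d','e','f'] from rfl,
    show "ghi".toList = ['g','h','i'] from rfl,
    show "jkl".toList = ['j','k','l'] from rfl,
    show "mno".toList = ['m','n','o'] from rfl,
    show "pqrs".toList = ['p','q','r','s'] from rfl,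
    show "tuv".toList = ['t','u','v'] from rfl,
    show "wxyz".toList = ['w','x','y','z'] from rfl]
  by_cases h0 : c = 'a'
  · subst h0; rfl
  simp only [if_neg h0, if_neg (show ¬('a' = c) from fun hh => h0 hh.symm)]
  by_cases h1 : c = 'b'
  · subst h1; rfl
  simp only [if_neg h1, if_neg (show ¬('b' = c) from fun hh => h1 hh.symm)]
  by_cases h2 : c = 'c'
  · subst h2; rfl
  simp only [if_neg h2, if_neg (show ¬('c' = c) from fun hh => h2 hh.symm)]
  by_cases h3 : c = 'd'
  · subst h3; rfl
  simp only [if_neg h3, if_neg (show ¬('d' = c) from fun hh => h3 hh.symm)]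
  by_cases h4 : c = 'e'
  · subst h4; rfl
  simp only [if_neg h4, if_neg (show ¬('e' = c) from fun hh => h4 hh.symm)]
  by_cases h5 : c = 'f'
  · subst h5; rfl
  simp only [if_neg h5, if_neg (show ¬('f' = c) from fun hh => h5 hh.symm)]
  by_cases h6 : c = 'g'
  · subst h6; rfl
  simp only [if_neg h6, if_neg (show ¬('g' = c) from fun hh => h6 hh.symm)]
  by_cases h7 : c = 'h'
  · subst h7; rfl
  simp only [if_neg h7, if_neg (show ¬('h' = c) from fun hh => h7 hh.symm)]
  by_cases h8 : c = 'i'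
  · subst h8; rfl
  simp only [if_neg h8, if_neg (show ¬('i' = c) from fun hh => h8 hh.symm)]
  by_cases h9 : c = 'j'
  · subst h9; rfl
  simp only [if_neg h9, if_neg (show ¬('j' = c) from fun hh => h9 hh.symm)]
  by_cases h10 : c = 'k'
  · subst h10; rfl
  simp only [if_neg h10, if_neg (show ¬('k' = c) from fun hh => h10 hh.symm)]
  by_cases h11 : c = 'l'
  · subst h11; rfl
  simp only [if_neg h11, if_neg (show ¬('l' = c) from fun hh => h11 hh.symm)]
  by_cases h12 : c = 'm'
  · subst h12; rfl
  simp only [if_neg h12, if_neg (show ¬('m' = c) from fun hh => h12 hh.symm)]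
  by_cases h13 : c = 'n'
  · subst h13; rfl
  simp only [if_neg h13, if_neg (show ¬('n' = c) from fun hh => h13 hh.symm)]
  by_cases h14 : c = 'o'
  · subst h14; rfl
  simp only [if_neg h14, if_neg (show ¬('o' = c) from fun hh => h14 hh.symm)]
  by_cases h15 : c = 'p'
  · subst h15; rfl
  simp only [if_neg h15, if_neg (show ¬('p' = c) from fun hh => h15 hh.symm)]
  by_cases h16 : c = 'q'
  · subst h16; rfl
  simp only [if_neg h16, if_neg (show ¬('q' = c) from fun hh => h16 hh.symm)]
  by_cases h17 : c = 'r'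
  · subst h17; rfl
  simp only [if_neg h17, if_neg (show ¬('r' = c) from fun hh => h17 hh.symm)]
  by_cases h18 : c = 's'
  · subst h18; rfl
  simp only [if_neg h18, if_neg (show ¬('s' = c) from fun hh => h18 hh.symm)]
  by_cases h19 : c = 't'
  · subst h19; rfl
  simp only [if_neg h19, if_neg (show ¬('t' = c) from fun hh => h19 hh.symm)]
  by_cases h20 : c = 'u'
  · subst h20; rfl
  simp only [if_neg h20, if_neg (show ¬('u' = c) from fun hh => h20 hh.symm)]
  by_cases h21 : c = 'v'
  · subst h21; rfl
  simp only [if_neg h21, if_neg (show ¬('v' = c) from fun hh => h21 hh.symm)]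
  by_cases h22 : c = 'w'
  · subst h22; rfl
  simp only [if_neg h22, if_neg (show ¬('w' = c) from fun hh => h22 hh.symm)]
  by_cases h23 : c = 'x'
  · subst h23; rfl
  simp only [if_neg h23, if_neg (show ¬('x' = c) from fun hh => h23 hh.symm)]
  by_cases h24 : c = 'y'
  · subst h24; rfl
  simp only [if_neg h24, if_neg (show ¬('y' = c) from fun hh => h24 hh.symm)]
  by_cases h25 : c = 'z'
  · subst h25; rfl
  simp only [if_neg h25, if_neg (show ¬('z' = c) from fun hh => h25 hh.symm)]

-- key per-character fact: B's piece(s) concatenate to A's piece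
lemma piece_eq (c : Char) : ((pbl c).map String.toList).flatten = (pieceA c).toList := by
  by_cases hsp : c = ' ' ∨ c = '_'
  · rcases hsp with h | h <;> subst h <;> rfl
  unfold pbl pieceA
  simp only [if_neg hsp]
  rw [pvPiece_eq]
  by_cases h0 : c = 'a'
  · subst h0; rfl
  simp only [if_neg h0]
  by_cases h1 : c = 'b'
  · subst h1; rfl
  simp only [if_neg h1]
  by_cases h2 : c = 'c'
  · subst h2; rfl
  simp only [if_neg h2]
  by_cases h3 : c = 'd'
  · subst h3; rfl
  simp only [if_neg h3]
  by_cases h4 : c = 'e'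
  · subst h4; rfl
  simp only [if_neg h4]
  by_cases h5 : c = 'f'
  · subst h5; rfl
  simp only [if_neg h5]
  by_cases h6 : c = 'g'
  · subst h6; rfl
  simp only [if_neg h6]
  by_cases h7 : c = 'h'
  · subst h7; rfl
  simp only [if_neg h7]
  by_cases h8 : c = 'i'
  · subst h8; rfl
  simp only [if_neg h8]
  by_cases h9 : c = 'j'
  · subst h9; rfl
  simp only [if_neg h9]
  by_cases h10 : c = 'k'
  · subst h10; rfl
  simp only [if_neg h10]
  by_cases h11 : c = 'l'
  · subst h11; rfl
  simp only [if_neg h11]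
  by_cases h12 : c = 'm'
  · subst h12; rfl
  simp only [if_neg h12]
  by_cases h13 : c = 'n'
  · subst h13; rfl
  simp only [if_neg h13]
  by_cases h14 : c = 'o'
  · subst h14; rfl
  simp only [if_neg h14]
  by_cases h15 : c = 'p'
  · subst h15; rfl
  simp only [if_neg h15]
  by_cases h16 : c = 'q'
  · subst h16; rfl
  simp only [if_neg h16]
  by_cases h17 : c = 'r'
  · subst h17; rfl
  simp only [if_neg h17]
  by_cases h18 : c = 's'
  · subst h18; rfl
  simp only [if_neg h18]
  by_cases h19 : c = 't'
  · subst h19; rfl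
  simp only [if_neg h19]
  by_cases h20 : c = 'u'
  · subst h20; rfl
  simp only [if_neg h20]
  by_cases h21 : c = 'v'
  · subst h21; rfl
  simp only [if_neg h21]
  by_cases h22 : c = 'w'
  · subst h22; rfl
  simp only [if_neg h22]
  by_cases h23 : c = 'x'
  · subst h23; rfl
  simp only [if_neg h23]
  by_cases h24 : c = 'y'
  · subst h24; rfl
  simp only [if_neg h24]
  by_cases h25 : c = 'z'
  · subst h25; rfl
  simp only [if_neg h25]
  rfl

-- ===== VERDICT (by name: the statement is the Claim_ definition above) =====
theorem dtmf_encode_string_to_signal_spec : Claim_equal_dtmf_encode_string_to_signal := by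
  intro s _
  unfold Spec_dtmf_encode_string_to_signal dtmf_encode_string_to_signal dtmf_encode_string_to_signal_alt
  apply String.ext
  rw [foldA_eq, foldB_eq, PySem.Str.toList_join]
  simp only [show ("" : String).toList = [] from rfl, join_empty_sep, List.nil_append]
  rw [flatten_flatMap]
  simp only [piece_eq]
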